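-- pv_equiv track=rewrite | github.com/apillai70/application-auto-discoverer | static/ui/js/archetype_enhancer.py | _determine_security_zone
-- ===== SOURCE A (Python) =====
-- from typing import List, Dict, Any, Set
--
-- def _determine_security_zone(service_type: str, app_name: str, ports: List[int]) -> str:
--     """Determine banking security zone"""
--
--     name_lower = app_name.lower()
--
--     # DMZ: External-facing services
--     if (service_type == 'api_gateway' or
--         any(term in name_lower for term in ['api', 'web', 'portal', 'external'])):
--         return 'dmz'
--
--     # Core Banking: Critical data systems
--     elif (service_type == 'data_store' or
--           any(term in name_lower for term in ['core', 'ledger', 'transaction', 'account'])):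
--         return 'core_banking'
--
--     # Internal: Business logic and integration
--     else:
--         return 'internal'
-- ===== SOURCE B (Python) =====
-- def _determine_security_zone(service_type, app_name, ports):
--     """One left-to-right scan over character positions keeping the minimum
--     zone priority seen (0=dmz, 1=core_banking, 2=internal)."""
--     _TERM_RANK = {'api': 0, 'web': 0, 'portal': 0, 'external': 0,
--                   'core': 1, 'ledger': 1, 'transaction': 1, 'account': 1}
--     best = {'api_gateway': 0, 'data_store': 1}.get(service_type, 2)
--     name = app_name.lower()
--     for i in range(len(name)):
--         suffix = name[i:]
--         for term, rank in _TERM_RANK.items():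
--             if suffix.startswith(term):
--                 best = min(best, rank)
--     return ('dmz', 'core_banking', 'internal')[best]
-- ===== Notes on version B (the rewrite author's own statement) =====
-- stated objective: alternative
-- what changed: Instead of A's if/elif chain of boolean substring tests, B does one scan over the character positions of the lowercased name, keeping the minimum zone priority (0=dmz, 1=core_banking, 2=internal) contributed by term prefixes found at each position and by the service_type, then indexes a zone table with that minimum.
import Mathlib
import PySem

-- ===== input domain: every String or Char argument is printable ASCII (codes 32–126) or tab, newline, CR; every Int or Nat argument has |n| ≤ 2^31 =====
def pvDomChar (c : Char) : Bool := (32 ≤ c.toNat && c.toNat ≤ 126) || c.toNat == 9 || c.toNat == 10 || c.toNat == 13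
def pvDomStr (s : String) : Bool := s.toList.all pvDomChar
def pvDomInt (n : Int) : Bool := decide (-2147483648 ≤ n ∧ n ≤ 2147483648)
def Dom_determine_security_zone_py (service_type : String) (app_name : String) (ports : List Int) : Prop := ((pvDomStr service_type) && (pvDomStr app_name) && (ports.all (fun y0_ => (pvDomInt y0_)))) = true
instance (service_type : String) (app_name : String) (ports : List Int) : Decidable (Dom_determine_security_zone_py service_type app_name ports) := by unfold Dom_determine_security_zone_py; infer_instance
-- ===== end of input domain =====

-- B replaces A's if/elif boolean substring chain by a single scan over character positions that
-- keeps the minimum zone priority (0=dmz, 1=core_banking, 2=internal) and indexes a zone table (alternative algorithm).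


-- ===== PORT A =====
def determine_security_zone_py (service_type : String) (app_name : String) (_ports : List Int) : String :=
  let name_lower := PySem.Str.lower app_name
  if service_type == "api_gateway" ||
     (["api", "web", "portal", "external"].any (fun term => PySem.Str.isIn term name_lower)) then
    "dmz"
  else if service_type == "data_store" ||
     (["core", "ledger", "transaction", "account"].any (fun term => PySem.Str.isIn term name_lower)) then
    "core_banking"
  else
    "internal"

-- ===== PORT B =====
def pvTermRank : List (String × Nat) :=
  [("api", 0), ("web", 0), ("portal", 0), ("external", 0),
   ("core", 1), ("ledger", 1), ("transaction", 1), ("account", 1)]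

def determine_security_zone_py_alt (service_type : String) (app_name : String) (_ports : List Int) : String :=
  let init : Nat := PySem.Dict.getD (PySem.Dict.mk [("api_gateway", 0), ("data_store", 1)]) service_type 2
  let name := PySem.Str.lower app_name
  let best := (PySem.List.pyRange 0 (PySem.Str.len name) 1).foldl
    (fun best i =>
      let suffix := PySem.Str.slice name (some i) none
      pvTermRank.foldl (fun b tr => if PySem.Str.startswith suffix tr.1 then min b tr.2 else b) best)
    init
  ["dmz", "core_banking", "internal"].getD best ""

-- ===== PRECONDITION & SPEC =====
def Spec_determine_security_zone_py (service_type : String) (app_name : String) (ports : List Int) (out : String) : Prop := out = determine_security_zone_py_alt service_type app_name ports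
instance (service_type : String) (app_name : String) (ports : List Int) (out : String) : Decidable (Spec_determine_security_zone_py service_type app_name ports out) := by unfold Spec_determine_security_zone_py; infer_instance

-- ===== CLAIM (what is proved, stated in full; the proofs are below) =====
def Claim_equal_determine_security_zone_py : Prop := ∀ (service_type : String) (app_name : String) (ports : List Int), Dom_determine_security_zone_py service_type app_name ports → Spec_determine_security_zone_py service_type app_name ports (determine_security_zone_py service_type app_name ports)

-- ===== LEMMAS AND PROOFS =====

-- A fold that conditionally takes a min is ≤ k iff the seed is, or some element contributes a value ≤ k.
theorem pv_foldl_min_le_iff {α : Type} (g : Nat → α → Nat) (P : α → Nat → Prop)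
    (hg : ∀ b x k, g b x ≤ k ↔ b ≤ k ∨ P x k) (xs : List α) :
    ∀ (init k : Nat), xs.foldl g init ≤ k ↔ init ≤ k ∨ ∃ x ∈ xs, P x k := by
  induction xs with
  | nil => intro init k; simp
  | cons x xs ih =>
      intro init k
      rw [List.foldl_cons, ih, hg]
      simp only [List.mem_cons]
      constructor
      · rintro ((h | h) | ⟨y, hy, hP⟩)
        · exact Or.inl h
        · exact Or.inr ⟨x, Or.inl rfl, h⟩
        · exact Or.inr ⟨y, Or.inr hy, hP⟩
      · rintro (h | ⟨y, (rfl | hy), hP⟩)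
        · exact Or.inl (Or.inl h)
        · exact Or.inl (Or.inr hP)
        · exact Or.inr ⟨y, hy, hP⟩

-- Some position i in range(len name) has name[i:] starting with t  ⟺  t is a substring of name (t nonempty).
theorem pv_exists_pos_iff_isIn (name t : String) (ht : t.toList ≠ []) :
    (∃ i ∈ PySem.List.pyRange 0 (PySem.Str.len name) 1,
        PySem.Str.startswith (PySem.Str.slice name (some i) none) t = true)
    ↔ PySem.Str.isIn t name = true := by
  have hiff : ∀ i : Int, 0 ≤ i →
      (PySem.Str.startswith (PySem.Str.slice name (some i) none) t = true
        ↔ t.toList <+: name.toList.drop i.toNat) := by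
    intro i hi
    rw [PySem.Str.startswith_eq, ← PySem.Chars.startswith_iff]
    have : (PySem.Str.slice name (some i) none).toList = name.toList.drop i.toNat := by
      rw [PySem.Str.toList_slice, PySem.Chars.slice_eq_listSlice, PySem.List.slice_from _ hi]
    rw [this]
  rw [PySem.Str.isIn_eq, ← PySem.Chars.exists_prefix_drop_iff_isIn]
  constructor
  · rintro ⟨i, hmem, hsw⟩
    have h := (PySem.List.mem_pyRange_one.mp hmem)
    exact ⟨i.toNat, (hiff i h.1).mp hsw⟩
  · rintro ⟨j, hpre⟩
    have hj : j < name.toList.length := by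
      by_contra h
      push_neg at h
      rw [List.drop_eq_nil_of_le h] at hpre
      exact ht (List.prefix_nil.mp hpre)
    refine ⟨(j : Int), ?_, ?_⟩
    · rw [PySem.List.mem_pyRange_one]
      constructor
      · exact Int.natCast_nonneg j
      · have : PySem.Str.len name = (name.toList.length : Int) := by
          simp [PySem.Str.len_eq, PySem.Chars.len_eq]
        omega
    · rw [hiff _ (Int.natCast_nonneg j)]
      simpa using hpre

-- ===== VERDICT (by name: the statement is the Claim_ definition above) =====
theorem determine_security_zone_py_spec : Claim_equal_determine_security_zone_py := by
  intro service_type app_name ports _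
  unfold Spec_determine_security_zone_py determine_security_zone_py determine_security_zone_py_alt
  dsimp only
  set name := PySem.Str.lower app_name with hname
  set init : Nat := PySem.Dict.getD (PySem.Dict.mk [("api_gateway", 0), ("data_store", 1)]) service_type 2 with hinit
  set best := (PySem.List.pyRange 0 (PySem.Str.len name) 1).foldl
    (fun best i =>
      let suffix := PySem.Str.slice name (some i) none
      pvTermRank.foldl (fun b tr => if PySem.Str.startswith suffix tr.1 then min b tr.2 else b) best)
    init with hbest
  -- characterization of best ≤ k
  have hcond : ∀ (c : Bool) (b r k : Nat), (if c = true then min b r else b) ≤ k ↔ b ≤ k ∨ (c = true ∧ r ≤ k) := by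
    intro c b r k; cases c <;> simp [min_le_iff]
  have hchar : ∀ k : Nat, best ≤ k ↔ init ≤ k ∨
      ∃ tr ∈ pvTermRank, tr.2 ≤ k ∧ PySem.Str.isIn tr.1 name = true := by
    intro k
    rw [hbest]
    rw [pv_foldl_min_le_iff
      (P := fun i k => ∃ tr ∈ pvTermRank,
        PySem.Str.startswith (PySem.Str.slice name (some i) none) tr.1 = true ∧ tr.2 ≤ k)
      (g := fun best i =>
        let suffix := PySem.Str.slice name (some i) none
        pvTermRank.foldl (fun b tr => if PySem.Str.startswith suffix tr.1 then min b tr.2 else b) best)]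
    · constructor
      · rintro (h | ⟨i, hi, tr, htr, hsw, hk⟩)
        · exact Or.inl h
        · refine Or.inr ⟨tr, htr, hk, ?_⟩
          rw [← pv_exists_pos_iff_isIn name tr.1 (by fin_cases htr <;> decide)]
          exact ⟨i, hi, hsw⟩
      · rintro (h | ⟨tr, htr, hk, hin⟩)
        · exact Or.inl h
        · obtain ⟨i, hi, hsw⟩ :=
            (pv_exists_pos_iff_isIn name tr.1 (by fin_cases htr <;> decide)).mpr hin
          exact Or.inr ⟨i, hi, tr, htr, hsw, hk⟩
    · intro b i k'
      exact pv_foldl_min_le_iff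
        (g := fun b tr => if PySem.Str.startswith (PySem.Str.slice name (some i) none) tr.1 then min b tr.2 else b)
        (P := fun tr k => PySem.Str.startswith (PySem.Str.slice name (some i) none) tr.1 = true ∧ tr.2 ≤ k)
        (fun b' tr k'' => hcond _ b' tr.2 k'') pvTermRank b k'
  have hinitval : init = (if service_type = "api_gateway" then 0
      else if service_type = "data_store" then 1 else 2) := by
    rw [hinit, PySem.Dict.getD_eq_get?_getD, PySem.Dict.get?_mk_cons, PySem.Dict.get?_mk_cons]
    by_cases h1 : service_type = "api_gateway"
    · subst h1; simp
    · by_cases h2 : service_type = "data_store"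
      · subst h2; simp
      · simp only [beq_iff_eq]
        rw [if_neg (fun e => h1 e.symm), if_neg (fun e => h2 e.symm), if_neg h1, if_neg h2]
        simp [PySem.Dict.get?]
  have hbest2 : best ≤ 2 := by
    rw [hchar]; left; rw [hinitval]; split_ifs <;> omega
  have hApi : (service_type == "api_gateway" ||
      (["api", "web", "portal", "external"].any (fun term => PySem.Str.isIn term name))) = true ↔
      (service_type = "api_gateway" ∨
        ∃ t ∈ (["api", "web", "portal", "external"] : List String), PySem.Str.isIn t name = true) := by
    simp
  have hCore : (service_type == "data_store" ||
      (["core", "ledger", "transaction", "account"].any (fun term => PySem.Str.isIn term name))) = true ↔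
      (service_type = "data_store" ∨
        ∃ t ∈ (["core", "ledger", "transaction", "account"] : List String), PySem.Str.isIn t name = true) := by
    simp
  by_cases c0 : service_type = "api_gateway" ∨
      ∃ t ∈ (["api", "web", "portal", "external"] : List String), PySem.Str.isIn t name = true
  · have hb0 : best = 0 := by
      have : best ≤ 0 := by
        rw [hchar]
        rcases c0 with h | ⟨t, ht, hin⟩
        · left; rw [hinitval]; simp [h]
        · right
          fin_cases ht
          · exact ⟨("api", 0), by decide, by omega, hin⟩
          · exact ⟨("web", 0), by decide, by omega, hin⟩
          · exact ⟨("portal", 0), by decide, by omega, hin⟩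
          · exact ⟨("external", 0), by decide, by omega, hin⟩
      omega
    rw [if_pos (hApi.mpr c0), hb0]
    rfl
  · have hc0 : service_type ≠ "api_gateway" ∧
        ∀ t ∈ (["api", "web", "portal", "external"] : List String), ¬ PySem.Str.isIn t name = true := by
      push_neg at c0; exact c0
    by_cases c1 : service_type = "data_store" ∨
        ∃ t ∈ (["core", "ledger", "transaction", "account"] : List String), PySem.Str.isIn t name = true
    · have hb1 : best = 1 := by
        have hle : best ≤ 1 := by
          rw [hchar]
          rcases c1 with h | ⟨t, ht, hin⟩
          · left; rw [hinitval]; simp [h]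
          · right
            fin_cases ht
            · exact ⟨("core", 1), by decide, by omega, hin⟩
            · exact ⟨("ledger", 1), by decide, by omega, hin⟩
            · exact ⟨("transaction", 1), by decide, by omega, hin⟩
            · exact ⟨("account", 1), by decide, by omega, hin⟩
        have hne : ¬ best ≤ 0 := by
          rw [hchar]
          rintro (h | ⟨tr, htr, hk, hin⟩)
          · rw [hinitval] at h
            split_ifs at h with h1 h2
            · exact hc0.1 h1
            · omega
            · omega
          · fin_cases htr
            · exact hc0.2 "api" (by decide) hin
            · exact hc0.2 "web" (by decide) hin
            · exact hc0.2 "portal" (by decide) hin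
            · exact hc0.2 "external" (by decide) hin
            all_goals omega
        omega
      rw [if_neg (fun hc => c0 (hApi.mp hc)), if_pos (hCore.mpr c1), hb1]
      rfl
    · have hc1 : service_type ≠ "data_store" ∧
          ∀ t ∈ (["core", "ledger", "transaction", "account"] : List String), ¬ PySem.Str.isIn t name = true := by
        push_neg at c1; exact c1
      have hb2 : best = 2 := by
        have hne : ¬ best ≤ 1 := by
          rw [hchar]
          rintro (h | ⟨tr, htr, hk, hin⟩)
          · rw [hinitval] at h
            split_ifs at h with h1 h2
            · exact hc0.1 h1
            · exact hc1.1 h2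
            · omega
          · fin_cases htr
            · exact hc0.2 "api" (by decide) hin
            · exact hc0.2 "web" (by decide) hin
            · exact hc0.2 "portal" (by decide) hin
            · exact hc0.2 "external" (by decide) hin
            · exact hc1.2 "core" (by decide) hin
            · exact hc1.2 "ledger" (by decide) hin
            · exact hc1.2 "transaction" (by decide) hin
            · exact hc1.2 "account" (by decide) hin
        omega
      rw [if_neg (fun hc => c0 (hApi.mp hc)), if_neg (fun hc => c1 (hCore.mp hc)), hb2]
      rfl
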